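-- pv_equiv track=rewrite | github.com/Darshan060224/FEPD | src/utils/forensic_paths.py | is_workspace_path
-- ===== SOURCE A (Python) =====
-- def is_workspace_path(path: str) -> bool:
--     """Check if path is from FEPD workspace/case directory."""
--     if not path:
--         return False
--
--     path_lower = path.lower().replace('\\', '/')
--
--     workspace_markers = [
--         'cases/', '/artifacts/', '/workspace/', '/extracted/',
--         '/dataa/', '/output/', '/reports/'
--     ]
--
--     return any(marker in path_lower for marker in workspace_markers)
-- ===== SOURCE B (Python) =====
-- _MARKERS = ('cases/', '/artifacts/', '/workspace/', '/extracted/',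
--             '/dataa/', '/output/', '/reports/')
--
-- def is_workspace_path(path: str) -> bool:
--     """Single left-to-right scan: at each position of the normalized path,
--     test whether one of the literal markers starts there."""
--     s = path.lower().replace('\\', '/')
--     for i in range(len(s)):
--         for m in _MARKERS:
--             if s.startswith(m, i):
--                 return True
--     return False
-- ===== Notes on version B (the rewrite author's own statement) =====
-- stated objective: alternative
-- what changed: Replaced the seven independent substring searches behind any(...) with a single left-to-right scan of the normalized path that tests at each position whether any marker starts there (multi-pattern scan, as a regex alternation would do); the empty-string guard disappears since the scan naturally returns False.
import Mathlib
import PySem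

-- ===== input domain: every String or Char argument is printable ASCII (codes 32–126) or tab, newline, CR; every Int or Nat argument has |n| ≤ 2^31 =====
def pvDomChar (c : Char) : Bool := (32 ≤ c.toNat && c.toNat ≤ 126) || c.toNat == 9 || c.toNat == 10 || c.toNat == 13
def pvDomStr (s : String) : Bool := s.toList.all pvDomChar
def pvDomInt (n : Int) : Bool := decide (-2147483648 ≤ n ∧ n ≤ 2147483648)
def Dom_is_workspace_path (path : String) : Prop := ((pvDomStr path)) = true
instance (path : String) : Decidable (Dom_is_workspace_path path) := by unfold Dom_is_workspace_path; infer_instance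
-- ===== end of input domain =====

-- B replaces the seven independent substring searches with one left-to-right scan
-- that tests at each position whether any marker starts there (objective: alternative).

-- ===== PORT A =====
def pvMarkers : List String :=
  ["cases/", "/artifacts/", "/workspace/", "/extracted/", "/dataa/", "/output/", "/reports/"]

def is_workspace_path (path : String) : Bool :=
  if path = "" then false
  else
    let path_lower := PySem.Str.replace (PySem.Str.lower path) "\\" "/"
    pvMarkers.any (fun m => PySem.Str.isIn m path_lower)

-- ===== PORT B =====
def pvMarkersB : List (List Char) :=
  ["cases/".toList, "/artifacts/".toList, "/workspace/".toList, "/extracted/".toList,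
   "/dataa/".toList, "/output/".toList, "/reports/".toList]

-- the position loop 'for i in range(len(s)): s.startswith(m, i)' as recursion over suffixes
def pvScan : List Char → Bool
  | [] => false
  | c :: rest => pvMarkersB.any (fun m => m.isPrefixOf (c :: rest)) || pvScan rest

def is_workspace_path_alt (path : String) : Bool :=
  let s := PySem.Str.replace (PySem.Str.lower path) "\\" "/"
  pvScan s.toList

-- ===== PRECONDITION & SPEC =====
def Spec_is_workspace_path (path : String) (out : Bool) : Prop := out = is_workspace_path_alt path
instance (path : String) (out : Bool) : Decidable (Spec_is_workspace_path path out) := by unfold Spec_is_workspace_path; infer_instance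

-- ===== CLAIM (what is proved, stated in full; the proofs are below) =====
def Claim_equal_is_workspace_path : Prop := ∀ (path : String), Dom_is_workspace_path path → Spec_is_workspace_path path (is_workspace_path path)

-- ===== LEMMAS AND PROOFS =====

lemma pvScan_iff (t : List Char) : pvScan t = true ↔ ∃ m ∈ pvMarkersB, m <:+: t := by
  induction t with
  | nil =>
    simp only [pvScan]
    refine iff_of_false (by simp) ?_
    rintro ⟨m, hm, hinf⟩
    have : m = [] := List.eq_nil_of_infix_nil hinf
    subst this
    revert hm; decide
  | cons c rest ih =>
    simp only [pvScan, Bool.or_eq_true, List.any_eq_true, ih]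
    constructor
    · rintro (⟨m, hm, hpre⟩ | ⟨m, hm, hinf⟩)
      · exact ⟨m, hm, ((List.isPrefixOf_iff_prefix).mp hpre).isInfix⟩
      · exact ⟨m, hm, List.infix_cons_iff.mpr (Or.inr hinf)⟩
    · rintro ⟨m, hm, hinf⟩
      rcases List.infix_cons_iff.mp hinf with hpre | hinf'
      · exact Or.inl ⟨m, hm, (List.isPrefixOf_iff_prefix).mpr hpre⟩
      · exact Or.inr ⟨m, hm, hinf'⟩

lemma pvMarkersB_eq : pvMarkers.map String.toList = pvMarkersB := by decide

theorem is_workspace_path_eq (path : String) :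
    is_workspace_path path = is_workspace_path_alt path := by
  by_cases h : path = ""
  · subst h; decide
  · simp only [is_workspace_path, is_workspace_path_alt, if_neg h]
    rw [Bool.eq_iff_iff]
    rw [List.any_eq_true, pvScan_iff, ← pvMarkersB_eq]
    constructor
    · rintro ⟨m, hm, hin⟩
      exact ⟨m.toList, List.mem_map_of_mem hm, (PySem.Str.isIn_iff_infix _ _).mp hin⟩
    · rintro ⟨ml, hml, hinf⟩
      rcases List.mem_map.mp hml with ⟨m, hm, rfl⟩
      exact ⟨m, hm, (PySem.Str.isIn_iff_infix _ _).mpr hinf⟩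

-- ===== VERDICT (by name: the statement is the Claim_ definition above) =====
theorem is_workspace_path_spec : Claim_equal_is_workspace_path := by
  intro path _
  exact is_workspace_path_eq path
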